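-- pv_equiv track=rewrite | github.com/dprgarner/codejam | python/fashion.py | _handle_case
-- ===== SOURCE A (Python) =====
-- def is_space_plus_only(grid, i, j):
--     """
--     i, j are between 0 and N-1 for a grid of size N.
--     Returns true if only plus-models can go in this space.
--     """
--     n = len(grid)
--     for y in range(n):
--         if y == i:
--             continue
--         if grid[y][j] == 'x' or grid[y][j] == 'o':
--             return True
--     for x in range(n):
--         if x == j:
--             continue
--         if grid[i][x] == 'x' or grid[i][x] == 'o':
--             return True
--     return False
--
-- def is_space_cross_only(grid, i, j):
--     """
--     i, j are between 0 and N-1 for a grid of size N.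
--     Returns true if only plus-models can go in this space.
--     """
--     n = len(grid)
--
--     # Diagonal ending at the top-left
--     offset = i - j
--     t_i, t_j = (0, -offset) if offset < 0 else (offset, 0)
--     for k in range(n - abs(offset)):
--         x, y = t_i + k, t_j + k
--         if x == i:
--             continue
--         if grid[x][y] == '+' or grid[x][y] == 'o':
--             return True
--
--     # Diagonal ending at the top-right
--     offset = i + j
--     t_i, t_j = (0, offset) if offset < n - 1 else (offset - n + 1, n - 1)
--
--     for k in range(t_j - t_i + 1):
--         x, y = t_i + k, t_j - k
--         if x == i:
--             continue
--         if grid[x][y] == '+' or grid[x][y] == 'o':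
--             return True
--     return False
--
-- def score_grid(grid):
--     def score_element(c):
--         if c == 'o':
--             return 2
--         if c == '+' or c == 'x':
--             return 1
--         return 0
--
--     sum = 0
--     n = len(grid)
--     for i in range(n):
--         for j in range(n):
--             sum += score_element(grid[i][j])
--     return sum
--
-- def _handle_case(grid):
--     model_changes = []
--     n = len(grid)
--     for i in range(n):
--         for j in range(n):
--             plus_only = is_space_plus_only(grid, i, j)
--             if plus_only and grid[i][j] == '+':
--                 continue
--             cross_only = is_space_cross_only(grid, i, j)
--             if cross_only and grid[i][j] == 'x':
--                 continue
--
--             if not plus_only and not cross_only and grid[i][j] == 'o':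
--                 continue
--             if plus_only and cross_only:
--                 continue
--
--             if plus_only and not cross_only:
--                 grid[i][j] = '+'
--             elif not plus_only and cross_only:
--                 grid[i][j] = 'x'
--             else:
--                 grid[i][j] = 'o'
--             model_changes.append(
--                 '{} {} {}'.format(grid[i][j], str(i+1), str(j+1))
--             )
--
--     output = '\n'.join([
--         '{} {}'.format(score_grid(grid), len(model_changes))
--     ] + model_changes)
--
--     return output
-- ===== SOURCE B (Python) =====
-- # B: single O(n^2) pass. Per-row/column/diagonal counts of x/o (resp. +/o) are
-- # precomputed once and updated incrementally at each write, so the per-cell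
-- # line scans of A disappear. Return value only: unlike A, B does not mutate
-- # the caller's grid (it works on a copy).
--
-- def _handle_case(grid):
--     n = len(grid)
--     g = [row[:] for row in grid]
--     row_xo = [sum(1 for j in range(n) if g[i][j] in ('x', 'o')) for i in range(n)]
--     col_xo = [sum(1 for i in range(n) if g[i][j] in ('x', 'o')) for j in range(n)]
--     # d1[t]: count of '+'/'o' on the diagonal x - y == t - (n-1)
--     d1 = [sum(1 for k in range(n - abs(t - (n - 1)))
--               if g[max(t - n + 1, 0) + k][max(n - 1 - t, 0) + k] in ('+', 'o'))
--           for t in range(2 * n - 1)]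
--     # d2[s]: count of '+'/'o' on the anti-diagonal x + y == s
--     d2 = [sum(1 for k in range(min(s, n - 1) - max(s - n + 1, 0) + 1)
--               if g[max(s - n + 1, 0) + k][s - max(s - n + 1, 0) - k] in ('+', 'o'))
--           for s in range(2 * n - 1)]
--     changes = []
--     for i in range(n):
--         for j in range(n):
--             c = g[i][j]
--             xoc = 1 if c in ('x', 'o') else 0
--             poc = 1 if c in ('+', 'o') else 0
--             plus_only = row_xo[i] + col_xo[j] - 2 * xoc > 0
--             cross_only = d1[i - j + n - 1] + d2[i + j] - 2 * poc > 0
--             if plus_only and cross_only: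
--                 continue
--             v = '+' if plus_only else ('x' if cross_only else 'o')
--             if c == v:
--                 continue
--             g[i][j] = v
--             row_xo[i] += (1 if v in ('x', 'o') else 0) - xoc
--             col_xo[j] += (1 if v in ('x', 'o') else 0) - xoc
--             d1[i - j + n - 1] += (1 if v in ('+', 'o') else 0) - poc
--             d2[i + j] += (1 if v in ('+', 'o') else 0) - poc
--             changes.append('{} {} {}'.format(v, i + 1, j + 1))
--     score = sum(2 if g[i][j] == 'o' else (1 if g[i][j] in ('+', 'x') else 0)
--                 for i in range(n) for j in range(n))
--     return '\n'.join(['{} {}'.format(score, len(changes))] + changes)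
-- ===== Notes on version B (the rewrite author's own statement) =====
-- stated objective: faster
-- what changed: A rescans the whole row, column and both diagonals for every cell (O(n) per cell); B precomputes per-row/column/diagonal counts of x/o and +/o models once and updates them incrementally at each write, deciding each cell in O(1); B also does not mutate the caller's grid (return value is identical).
import Mathlib
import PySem

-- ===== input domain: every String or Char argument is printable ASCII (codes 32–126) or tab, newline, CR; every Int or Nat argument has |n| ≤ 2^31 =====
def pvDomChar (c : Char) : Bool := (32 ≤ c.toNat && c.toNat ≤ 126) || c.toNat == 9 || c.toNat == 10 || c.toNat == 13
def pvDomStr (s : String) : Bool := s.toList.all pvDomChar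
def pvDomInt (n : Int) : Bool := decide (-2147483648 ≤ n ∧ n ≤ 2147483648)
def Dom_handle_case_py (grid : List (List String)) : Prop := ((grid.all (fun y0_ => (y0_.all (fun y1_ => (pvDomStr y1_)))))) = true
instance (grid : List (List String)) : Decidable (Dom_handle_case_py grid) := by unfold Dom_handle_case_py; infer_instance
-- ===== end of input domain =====

-- B replaces A's per-cell O(n) row/column/diagonal scans by per-line counts of
-- x/o (resp. +/o) models, precomputed once and updated incrementally at each
-- write (O(n^2) total vs A's O(n^3) worst case). Return value only: A mutates
-- the caller's grid in place, B works on a copy.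

-- ===== PORT A =====
-- shared trivial primitives (cell read/write, the two character tests, the
-- change-line formatting, the iteration order of the nested loops)
def cell (g : List (List String)) (i j : Nat) : String := (g.getD i []).getD j ""

def setCell (g : List (List String)) (i j : Nat) (v : String) : List (List String) :=
  g.set i ((g.getD i []).set j v)

def xoB (c : String) : Bool := c == "x" || c == "o"

def poB (c : String) : Bool := c == "+" || c == "o"

def scoreElem (c : String) : Int := if c == "o" then 2 else if c == "+" || c == "x" then 1 else 0

def chg (v : String) (i j : Nat) : String :=
  v ++ " " ++ PySem.Int.toStr ((i : Int) + 1) ++ " " ++ PySem.Int.toStr ((j : Int) + 1)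

-- 'for i in range(n): for j in range(n):' = one pass over the pairs in row-major order
def pairs (n : Nat) : List (Nat × Nat) :=
  (List.range n).flatMap (fun i => (List.range n).map (fun j => (i, j)))

-- A's is_space_plus_only: scan column j then row i (early return = any)
def is_space_plus_only_py (g : List (List String)) (i j : Nat) : Bool :=
  let n := g.length
  ((List.range n).any (fun y => decide (y ≠ i) && xoB (cell g y j))) ||
  ((List.range n).any (fun x => decide (x ≠ j) && xoB (cell g i x)))

-- A's is_space_cross_only: scan the two diagonals through (i,j).
-- Python's offset = i - j with branch 'offset < 0' becomes the i < j branch;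
-- Nat subtraction encodes exactly the branch Python takes.
def is_space_cross_only_py (g : List (List String)) (i j : Nat) : Bool :=
  let n := g.length
  let d1 :=
    if i < j then
      (List.range (n - (j - i))).any (fun k => decide (k ≠ i) && poB (cell g k (j - i + k)))
    else
      (List.range (n - (i - j))).any (fun k => decide (i - j + k ≠ i) && poB (cell g (i - j + k) k))
  let d2 :=
    let s := i + j
    if s + 1 < n then
      (List.range (s + 1)).any (fun k => decide (k ≠ i) && poB (cell g k (s - k)))
    else
      (List.range (2 * n - 1 - s)).any (fun k => decide (s + 1 - n + k ≠ i) && poB (cell g (s + 1 - n + k) (n - 1 - k)))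
  d1 || d2

def score_grid_py (g : List (List String)) : Int :=
  let n := g.length
  (List.range n).foldl (fun acc i => (List.range n).foldl (fun a j => a + scoreElem (cell g i j)) acc) 0

-- the body of A's nested loop, on state (grid, model_changes)
def astep (st : List (List String) × List String) (ij : Nat × Nat) :
    List (List String) × List String :=
  let g := st.1
  let i := ij.1
  let j := ij.2
  let plus_only := is_space_plus_only_py g i j
  if plus_only && (cell g i j == "+") then st
  else
    let cross_only := is_space_cross_only_py g i j
    if cross_only && (cell g i j == "x") then st
    else if !plus_only && !cross_only && (cell g i j == "o") then st
    else if plus_only && cross_only then st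
    else
      let v := if plus_only && !cross_only then "+"
               else if !plus_only && cross_only then "x" else "o"
      (setCell g i j v, st.2 ++ [chg v i j])

def handle_case_py (grid : List (List String)) : String :=
  let res := (pairs grid.length).foldl astep (grid, [])
  PySem.Str.join "\n"
    ((PySem.Int.toStr (score_grid_py res.1) ++ " " ++ PySem.Int.toStr ((res.2.length : Int))) :: res.2)

-- ===== PORT B =====
-- Source B's four count tables.  'sum(1 for k in range(m) if P(k))' is ported as
-- List.countP over List.range.  Nat subtraction '-' makes 't - (n-1)' and
-- '(n-1) - t' exactly Python's max(t-n+1, 0) and max(n-1-t, 0), and their sum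
-- is abs(t - (n-1)).
def rowCnt (g : List (List String)) (n i : Nat) : Nat :=
  (List.range n).countP (fun j => xoB (cell g i j))

def colCnt (g : List (List String)) (n j : Nat) : Nat :=
  (List.range n).countP (fun i => xoB (cell g i j))

-- d1Cnt g n t: '+'/'o' models on the diagonal x - y = t - (n-1)
def d1Cnt (g : List (List String)) (n t : Nat) : Nat :=
  (List.range (n - ((t - (n - 1)) + ((n - 1) - t)))).countP
    (fun k => poB (cell g ((t - (n - 1)) + k) (((n - 1) - t) + k)))

-- d2Cnt g n s: '+'/'o' models on the anti-diagonal x + y = s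
def d2Cnt (g : List (List String)) (n s : Nat) : Nat :=
  (List.range (min s (n - 1) - (s + 1 - n) + 1)).countP
    (fun k => poB (cell g ((s + 1 - n) + k) (s - (s + 1 - n) - k)))

structure BSt where
  g : List (List String)
  row : List Int
  col : List Int
  d1 : List Int
  d2 : List Int
  ch : List String

-- the body of Source B's loop: O(1) per cell, counts updated on each write
def bstep (n : Nat) (st : BSt) (ij : Nat × Nat) : BSt :=
  let i := ij.1
  let j := ij.2
  let c := cell st.g i j
  let xoc : Int := if xoB c then 1 else 0
  let poc : Int := if poB c then 1 else 0
  let plus_only := decide (0 < st.row.getD i 0 + st.col.getD j 0 - 2 * xoc)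
  let cross_only := decide (0 < st.d1.getD (i + (n - 1) - j) 0 + st.d2.getD (i + j) 0 - 2 * poc)
  if plus_only && cross_only then st
  else
    let v := if plus_only then "+" else if cross_only then "x" else "o"
    if c == v then st
    else
      let xov : Int := if xoB v then 1 else 0
      let pov : Int := if poB v then 1 else 0
      { g := setCell st.g i j v
        row := st.row.set i (st.row.getD i 0 + (xov - xoc))
        col := st.col.set j (st.col.getD j 0 + (xov - xoc))
        d1 := st.d1.set (i + (n - 1) - j) (st.d1.getD (i + (n - 1) - j) 0 + (pov - poc))
        d2 := st.d2.set (i + j) (st.d2.getD (i + j) 0 + (pov - poc))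
        ch := st.ch ++ [chg v i j] }

def handle_case_py_alt (grid : List (List String)) : String :=
  let n := grid.length
  let st := (pairs n).foldl (bstep n)
    { g := grid
      row := (List.range n).map (fun i => ((rowCnt grid n i : Int)))
      col := (List.range n).map (fun j => ((colCnt grid n j : Int)))
      d1 := (List.range (2 * n - 1)).map (fun t => ((d1Cnt grid n t : Int)))
      d2 := (List.range (2 * n - 1)).map (fun s => ((d2Cnt grid n s : Int)))
      ch := [] }
  let score := (List.range n).foldl
    (fun acc i => (List.range n).foldl (fun a j => a + scoreElem (cell st.g i j)) acc) 0
  PySem.Str.join "\n"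
    ((PySem.Int.toStr score ++ " " ++ PySem.Int.toStr ((st.ch.length : Int))) :: st.ch)

-- ===== PRECONDITION & SPEC =====
-- Pre_: every row at least as long as the grid; on any shorter row A hits an
-- out-of-range grid[i][j] and raises IndexError (every cell is eventually read).
def Pre_handle_case_py (grid : List (List String)) : Prop :=
  ∀ r ∈ grid, grid.length ≤ r.length
instance (grid : List (List String)) : Decidable (Pre_handle_case_py grid) := by
  unfold Pre_handle_case_py; infer_instance

def pvWitness_handle_case_py : List (List String) := [["o", "+"], [".", "x"]]

def Spec_handle_case_py (grid : List (List String)) (out : String) : Prop := out = handle_case_py_alt grid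
instance (grid : List (List String)) (out : String) : Decidable (Spec_handle_case_py grid out) := by unfold Spec_handle_case_py; infer_instance

-- ===== CLAIM (what is proved, stated in full; the proofs are below) =====
def Claim_equal_handle_case_py : Prop := ∀ (grid : List (List String)), Dom_handle_case_py grid → Pre_handle_case_py grid → Spec_handle_case_py grid (handle_case_py grid)

-- ===== LEMMAS AND PROOFS =====

def RowsOk (n : Nat) (g : List (List String)) : Prop :=
  g.length = n ∧ ∀ r ∈ g, n ≤ r.length

def CInv (n : Nat) (st : BSt) : Prop :=
  st.row = (List.range n).map (fun i => ((rowCnt st.g n i : Int))) ∧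
  st.col = (List.range n).map (fun j => ((colCnt st.g n j : Int))) ∧
  st.d1 = (List.range (2 * n - 1)).map (fun t => ((d1Cnt st.g n t : Int))) ∧
  st.d2 = (List.range (2 * n - 1)).map (fun s => ((d2Cnt st.g n s : Int)))

-- splitting a count over range m at one index k0 < m
lemma countP_range_split (p : Nat → Bool) (m k0 : Nat) (h : k0 < m) :
    (List.range m).countP p
      = (List.range m).countP (fun k => decide (k ≠ k0) && p k) + (if p k0 then 1 else 0) := by
  induction m with
  | zero => omega
  | succ q ih =>
    by_cases h' : k0 < q
    · have hq : q ≠ k0 := by omega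
      rw [List.range_succ]
      simp only [List.countP_append, List.countP_cons, List.countP_nil, hq, ih h',
        ne_eq, not_false_eq_true, decide_true, Bool.true_and]
      split_ifs <;> omega
    · have hq : k0 = q := by omega
      subst hq
      rw [List.range_succ]
      have hcg : (List.range k0).countP (fun k => decide (k ≠ k0) && p k)
          = (List.range k0).countP p := by
        apply List.countP_congr
        intro x hx
        simp only [List.mem_range] at hx
        simp [Nat.ne_of_lt hx]
      simp only [List.countP_append, List.countP_cons, List.countP_nil, hcg]
      simp

-- one line through (i,j): total count splits off the (i,j) contribution, and
-- A's skip-scan tests exactly the rest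
lemma line_decomp (g : List (List String)) (p : String → Bool) (m k0 i j : Nat)
    (X Y : Nat → Nat) (sk : Nat → Bool)
    (hk0 : k0 < m) (hX : X k0 = i) (hY : Y k0 = j)
    (hsk : ∀ k, k < m → ((sk k = true) ↔ k ≠ k0)) :
    ∃ sc : Nat,
      (List.range m).countP (fun k => p (cell g (X k) (Y k)))
          = sc + (if p (cell g i j) then 1 else 0)
      ∧ (List.range m).any (fun k => sk k && p (cell g (X k) (Y k))) = decide (0 < sc) := by
  refine ⟨(List.range m).countP (fun k => decide (k ≠ k0) && p (cell g (X k) (Y k))), ?_, ?_⟩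
  · have h := countP_range_split (fun k => p (cell g (X k) (Y k))) m k0 hk0
    simp only [hX, hY] at h
    exact h
  · have hiff : ((List.range m).any (fun k => sk k && p (cell g (X k) (Y k))) = true)
        ↔ (0 < (List.range m).countP (fun k => decide (k ≠ k0) && p (cell g (X k) (Y k)))) := by
      rw [List.any_eq_true, List.countP_pos_iff]
      constructor
      · rintro ⟨k, hk, hkp⟩
        simp only [List.mem_range] at hk
        simp only [Bool.and_eq_true] at hkp
        refine ⟨k, by simpa using hk, ?_⟩
        simp only [Bool.and_eq_true, decide_eq_true_eq]
        exact ⟨(hsk k hk).mp hkp.1, hkp.2⟩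
      · rintro ⟨k, hk, hkp⟩
        simp only [List.mem_range] at hk
        simp only [Bool.and_eq_true, decide_eq_true_eq] at hkp
        refine ⟨k, by simpa using hk, ?_⟩
        simp only [Bool.and_eq_true]
        exact ⟨(hsk k hk).mpr hkp.1, hkp.2⟩
    rw [Bool.eq_iff_iff, hiff]
    simp

lemma cell_setCell (g : List (List String)) (i j : Nat) (v : String) (x y : Nat)
    (hlen : i < g.length) (hrow : j < (g.getD i []).length) :
    cell (setCell g i j v) x y = if x = i ∧ y = j then v else cell g x y := by
  unfold cell setCell
  by_cases hx : x = i
  · subst hx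
    have h1 : (g.set x ((g.getD x []).set j v)).getD x [] = (g.getD x []).set j v := by
      rw [List.getD_eq_getElem?_getD, List.getElem?_set_self hlen]
      rfl
    rw [h1]
    by_cases hy : y = j
    · subst hy
      rw [if_pos ⟨rfl, rfl⟩, List.getD_eq_getElem?_getD, List.getElem?_set_self hrow]
      rfl
    · rw [if_neg (by simp [hy]), List.getD_eq_getElem?_getD,
        List.getElem?_set_ne (fun h => hy h.symm), ← List.getD_eq_getElem?_getD]
  · have h1 : (g.set i ((g.getD i []).set j v)).getD x [] = g.getD x [] := by
      rw [List.getD_eq_getElem?_getD, List.getElem?_set_ne (fun h => hx h.symm),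
        ← List.getD_eq_getElem?_getD]
    rw [h1, if_neg (by simp [hx])]

lemma rowsOk_setCell (n : Nat) (g : List (List String)) (i j : Nat) (v : String)
    (hg : RowsOk n g) (hi : i < n) : RowsOk n (setCell g i j v) := by
  obtain ⟨hl, hr⟩ := hg
  refine ⟨by simpa [setCell] using hl, ?_⟩
  intro r hrm
  rcases List.mem_or_eq_of_mem_set hrm with h | h
  · exact hr r h
  · subst h
    rw [List.length_set]
    apply hr
    rw [List.getD_eq_getElem?_getD, List.getElem?_eq_getElem (by omega)]
    exact List.getElem_mem _

lemma rowlen_of_rowsOk (n : Nat) (g : List (List String)) (i : Nat)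
    (hg : RowsOk n g) (hi : i < n) : n ≤ (g.getD i []).length := by
  obtain ⟨hl, hr⟩ := hg
  apply hr
  rw [List.getD_eq_getElem?_getD, List.getElem?_eq_getElem (by omega)]
  exact List.getElem_mem _

-- a line that passes through the rewritten cell exactly at index k0
lemma line_update (n : Nat) (g : List (List String)) (i j : Nat) (v : String)
    (hg : RowsOk n g) (hi : i < n) (hj : j < n)
    (p : String → Bool) (m k0 : Nat) (X Y : Nat → Nat)
    (hk0 : k0 < m) (hX : X k0 = i) (hY : Y k0 = j)
    (huniq : ∀ k, k < m → X k = i → Y k = j → k = k0) :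
    (List.range m).countP (fun k => p (cell (setCell g i j v) (X k) (Y k)))
        + (if p (cell g i j) then 1 else 0)
      = (List.range m).countP (fun k => p (cell g (X k) (Y k))) + (if p v then 1 else 0) := by
  have hilen : i < g.length := by
    obtain ⟨hl, _⟩ := hg
    omega
  have hjrow : j < (g.getD i []).length := by
    have := rowlen_of_rowsOk n g i hg hi
    omega
  rw [countP_range_split (fun k => p (cell (setCell g i j v) (X k) (Y k))) m k0 hk0,
      countP_range_split (fun k => p (cell g (X k) (Y k))) m k0 hk0]
  have hskip : (List.range m).countP (fun k => decide (k ≠ k0) && p (cell (setCell g i j v) (X k) (Y k)))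
      = (List.range m).countP (fun k => decide (k ≠ k0) && p (cell g (X k) (Y k))) := by
    apply List.countP_congr
    intro k hk
    simp only [List.mem_range] at hk
    by_cases hkk : k = k0
    · simp [hkk]
    · have hne : ¬(X k = i ∧ Y k = j) := by
        rintro ⟨h1, h2⟩
        exact hkk (huniq k hk h1 h2)
      rw [cell_setCell g i j v (X k) (Y k) hilen hjrow, if_neg hne]
  rw [hskip, cell_setCell g i j v (X k0) (Y k0) hilen hjrow, hX, hY,
    if_pos (show i = i ∧ j = j from ⟨rfl, rfl⟩)]
  split_ifs <;> omega

-- a line that misses the rewritten cell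
lemma line_unchanged (n : Nat) (g : List (List String)) (i j : Nat) (v : String)
    (hg : RowsOk n g) (hi : i < n) (hj : j < n)
    (p : String → Bool) (m : Nat) (X Y : Nat → Nat)
    (hnone : ∀ k, k < m → ¬(X k = i ∧ Y k = j)) :
    (List.range m).countP (fun k => p (cell (setCell g i j v) (X k) (Y k)))
      = (List.range m).countP (fun k => p (cell g (X k) (Y k))) := by
  have hilen : i < g.length := by
    obtain ⟨hl, _⟩ := hg
    omega
  have hjrow : j < (g.getD i []).length := by
    have := rowlen_of_rowsOk n g i hg hi
    omega
  apply List.countP_congr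
  intro k hk
  simp only [List.mem_range] at hk
  rw [cell_setCell g i j v (X k) (Y k) hilen hjrow, if_neg (hnone k hk)]

lemma set_map_range {β : Type} (f f' : Nat → β) (m k0 : Nat) (_hk : k0 < m) (a : β)
    (hne : ∀ k, k < m → k ≠ k0 → f' k = f k) (hself : a = f' k0) :
    ((List.range m).map f).set k0 a = (List.range m).map f' := by
  apply List.ext_getElem
  · simp
  · intro idx h1 h2
    have hidx : idx < m := by simpa using h2
    rw [List.getElem_set]
    simp only [List.getElem_map, List.getElem_range]
    by_cases hI : k0 = idx
    · subst hI
      simp [hself]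
    · rw [if_neg hI]
      exact (hne idx hidx (fun hh => hI hh.symm)).symm

-- A's plus-only scan equals B's count test
lemma plus_bridge (g : List (List String)) (n i j : Nat)
    (hn : g.length = n) (hi : i < n) (hj : j < n) :
    is_space_plus_only_py g i j
      = decide (0 < ((rowCnt g n i : Int)) + ((colCnt g n j : Int))
            - 2 * (if xoB (cell g i j) then 1 else 0)) := by
  obtain ⟨s1, e1, a1⟩ := line_decomp g xoB n i i j (fun y => y) (fun _ => j)
    (fun y => decide (y ≠ i)) hi rfl rfl (by intro k _; simp)
  obtain ⟨s2, e2, a2⟩ := line_decomp g xoB n j i j (fun _ => i) (fun x => x)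
    (fun x => decide (x ≠ j)) hj rfl rfl (by intro k _; simp)
  have ec : colCnt g n j = s1 + (if xoB (cell g i j) then 1 else 0) := e1
  have er : rowCnt g n i = s2 + (if xoB (cell g i j) then 1 else 0) := e2
  have a1' : (List.range n).any (fun y => decide (y ≠ i) && xoB (cell g y j)) = decide (0 < s1) := a1
  have a2' : (List.range n).any (fun x => decide (x ≠ j) && xoB (cell g i x)) = decide (0 < s2) := a2
  simp only [is_space_plus_only_py, hn]
  rw [a1', a2', ← Bool.decide_or, decide_eq_decide, ec, er]
  push_cast
  split_ifs <;> omega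

-- A's cross-only scan equals B's count test
lemma cross_bridge (g : List (List String)) (n i j : Nat)
    (hn : g.length = n) (hi : i < n) (hj : j < n) :
    is_space_cross_only_py g i j
      = decide (0 < ((d1Cnt g n (i + (n - 1) - j) : Int)) + ((d2Cnt g n (i + j) : Int))
            - 2 * (if poB (cell g i j) then 1 else 0)) := by
  simp only [is_space_cross_only_py, hn]
  -- d1 part
  have hD1 : ∃ s1, d1Cnt g n (i + (n - 1) - j) = s1 + (if poB (cell g i j) then 1 else 0) ∧
      (if i < j then
        (List.range (n - (j - i))).any (fun k => decide (k ≠ i) && poB (cell g k (j - i + k)))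
      else
        (List.range (n - (i - j))).any (fun k => decide (i - j + k ≠ i) && poB (cell g (i - j + k) k)))
      = decide (0 < s1) := by
    by_cases hij : i < j
    · obtain ⟨s1, e1, a1⟩ := line_decomp g poB (n - (j - i)) i i j (fun k => k)
        (fun k => j - i + k) (fun k => decide (k ≠ i)) (by omega) rfl (by beta_reduce; omega)
        (by intro k _; simp)
      refine ⟨s1, ?_, ?_⟩
      · unfold d1Cnt
        have h1 : (i + (n - 1) - j) - (n - 1) = 0 := by omega
        have h2 : (n - 1) - (i + (n - 1) - j) = j - i := by omega
        rw [h1, h2]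
        simpa using e1
      · rw [if_pos hij]
        exact a1
    · obtain ⟨s1, e1, a1⟩ := line_decomp g poB (n - (i - j)) j i j (fun k => i - j + k)
        (fun k => k) (fun k => decide (i - j + k ≠ i)) (by omega) (by beta_reduce; omega) rfl
        (by intro k hk; simp only [decide_eq_true_eq]; omega)
      refine ⟨s1, ?_, ?_⟩
      · unfold d1Cnt
        have h1 : (i + (n - 1) - j) - (n - 1) = i - j := by omega
        have h2 : (n - 1) - (i + (n - 1) - j) = 0 := by omega
        rw [h1, h2]
        simpa using e1
      · rw [if_neg hij]
        exact a1
  -- d2 part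
  have hD2 : ∃ s2, d2Cnt g n (i + j) = s2 + (if poB (cell g i j) then 1 else 0) ∧
      (if i + j + 1 < n then
        (List.range (i + j + 1)).any (fun k => decide (k ≠ i) && poB (cell g k (i + j - k)))
      else
        (List.range (2 * n - 1 - (i + j))).any
          (fun k => decide (i + j + 1 - n + k ≠ i) && poB (cell g (i + j + 1 - n + k) (n - 1 - k))))
      = decide (0 < s2) := by
    by_cases hs : i + j + 1 < n
    · obtain ⟨s2, e2, a2⟩ := line_decomp g poB (i + j + 1) i i j (fun k => k)
        (fun k => i + j - k) (fun k => decide (k ≠ i)) (by omega) rfl (by beta_reduce; omega)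
        (by intro k _; simp)
      refine ⟨s2, ?_, ?_⟩
      · unfold d2Cnt
        have h1 : i + j + 1 - n = 0 := by omega
        have h2 : min (i + j) (n - 1) - 0 + 1 = i + j + 1 := by omega
        rw [h1, h2]
        simpa using e2
      · rw [if_pos hs]
        exact a2
    · obtain ⟨s2, e2, a2⟩ := line_decomp g poB (2 * n - 1 - (i + j)) (i - (i + j + 1 - n)) i j
        (fun k => i + j + 1 - n + k) (fun k => n - 1 - k)
        (fun k => decide (i + j + 1 - n + k ≠ i)) (by omega) (by beta_reduce; omega) (by beta_reduce; omega)
        (by intro k hk; simp only [decide_eq_true_eq]; omega)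
      refine ⟨s2, ?_, ?_⟩
      · unfold d2Cnt
        have h1 : min (i + j) (n - 1) - (i + j + 1 - n) + 1 = 2 * n - 1 - (i + j) := by omega
        have h2 : i + j - (i + j + 1 - n) = n - 1 := by omega
        rw [h1, h2]
        simpa using e2
      · rw [if_neg hs]
        exact a2
  obtain ⟨s1, e1, a1⟩ := hD1
  obtain ⟨s2, e2, a2⟩ := hD2
  rw [a1, a2, ← Bool.decide_or, decide_eq_decide, e1, e2]
  push_cast
  split_ifs <;> omega

-- after a write, the count tables are the count tables of the written grid
lemma write_inv (n : Nat) (st : BSt) (i j : Nat) (v : String)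
    (hi : i < n) (hj : j < n) (hg : RowsOk n st.g) (hinv : CInv n st) :
    CInv n { g := setCell st.g i j v
             row := st.row.set i (st.row.getD i 0 +
               ((if xoB v then 1 else 0) - (if xoB (cell st.g i j) then 1 else 0)))
             col := st.col.set j (st.col.getD j 0 +
               ((if xoB v then 1 else 0) - (if xoB (cell st.g i j) then 1 else 0)))
             d1 := st.d1.set (i + (n - 1) - j) (st.d1.getD (i + (n - 1) - j) 0 +
               ((if poB v then 1 else 0) - (if poB (cell st.g i j) then 1 else 0)))
             d2 := st.d2.set (i + j) (st.d2.getD (i + j) 0 +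
               ((if poB v then 1 else 0) - (if poB (cell st.g i j) then 1 else 0)))
             ch := st.ch ++ [chg v i j] } := by
  obtain ⟨hrZ, hcZ, h1Z, h2Z⟩ := hinv
  have hrowD : st.row.getD i 0 = ((rowCnt st.g n i : Int)) := by
    rw [hrZ]; exact PySem.List.getD_map_range _ n i 0 hi
  have hcolD : st.col.getD j 0 = ((colCnt st.g n j : Int)) := by
    rw [hcZ]; exact PySem.List.getD_map_range _ n j 0 hj
  have hd1D : st.d1.getD (i + (n - 1) - j) 0 = ((d1Cnt st.g n (i + (n - 1) - j) : Int)) := by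
    rw [h1Z]; exact PySem.List.getD_map_range _ _ _ 0 (by omega)
  have hd2D : st.d2.getD (i + j) 0 = ((d2Cnt st.g n (i + j) : Int)) := by
    rw [h2Z]; exact PySem.List.getD_map_range _ _ _ 0 (by omega)
  refine ⟨?_, ?_, ?_, ?_⟩
  · -- row table
    show st.row.set i _ = _
    rw [hrowD, hrZ]
    apply set_map_range _ _ n i hi
    · intro k hk hkne
      have hu : rowCnt (setCell st.g i j v) n k = rowCnt st.g n k :=
        line_unchanged n st.g i j v hg hi hj xoB n (fun _ => k) (fun y => y)
          (by intro y hy h; simp only at h; exact hkne h.1)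
      exact_mod_cast congrArg (Nat.cast (R := Int)) hu
    · have hu : rowCnt (setCell st.g i j v) n i + (if xoB (cell st.g i j) then 1 else 0)
          = rowCnt st.g n i + (if xoB v then 1 else 0) :=
        line_update n st.g i j v hg hi hj xoB n j (fun _ => i) (fun y => y) hj rfl rfl
          (by intro k hk e1 e2; simp only at e2; exact e2)
      split_ifs at hu ⊢ <;> push_cast <;> omega
  · -- col table
    show st.col.set j _ = _
    rw [hcolD, hcZ]
    apply set_map_range _ _ n j hj
    · intro k hk hkne
      have hu : colCnt (setCell st.g i j v) n k = colCnt st.g n k :=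
        line_unchanged n st.g i j v hg hi hj xoB n (fun x => x) (fun _ => k)
          (by intro y hy h; simp only at h; exact hkne h.2)
      exact_mod_cast congrArg (Nat.cast (R := Int)) hu
    · have hu : colCnt (setCell st.g i j v) n j + (if xoB (cell st.g i j) then 1 else 0)
          = colCnt st.g n j + (if xoB v then 1 else 0) :=
        line_update n st.g i j v hg hi hj xoB n i (fun x => x) (fun _ => j) hi rfl rfl
          (by intro k hk e1 e2; simp only at e1; exact e1)
      split_ifs at hu ⊢ <;> push_cast <;> omega
  · -- d1 table
    show st.d1.set _ _ = _
    rw [hd1D, h1Z]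
    apply set_map_range _ _ (2 * n - 1) (i + (n - 1) - j) (by omega)
    · intro t ht htne
      have hu : d1Cnt (setCell st.g i j v) n t = d1Cnt st.g n t :=
        line_unchanged n st.g i j v hg hi hj poB (n - ((t - (n - 1)) + ((n - 1) - t)))
          (fun k => (t - (n - 1)) + k) (fun k => ((n - 1) - t) + k)
          (by intro k hk h; simp only at h; omega)
      exact_mod_cast congrArg (Nat.cast (R := Int)) hu
    · have hu : d1Cnt (setCell st.g i j v) n (i + (n - 1) - j) + (if poB (cell st.g i j) then 1 else 0)
          = d1Cnt st.g n (i + (n - 1) - j) + (if poB v then 1 else 0) :=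
        line_update n st.g i j v hg hi hj poB
          (n - (((i + (n - 1) - j) - (n - 1)) + ((n - 1) - (i + (n - 1) - j)))) (min i j)
          (fun k => ((i + (n - 1) - j) - (n - 1)) + k) (fun k => ((n - 1) - (i + (n - 1) - j)) + k)
          (by omega) (by simp only; omega) (by simp only; omega)
          (by intro k hk e1 e2; simp only at e1 e2; omega)
      split_ifs at hu ⊢ <;> push_cast <;> omega
  · -- d2 table
    show st.d2.set _ _ = _
    rw [hd2D, h2Z]
    apply set_map_range _ _ (2 * n - 1) (i + j) (by omega)
    · intro t ht htne
      have hu : d2Cnt (setCell st.g i j v) n t = d2Cnt st.g n t :=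
        line_unchanged n st.g i j v hg hi hj poB (min t (n - 1) - (t + 1 - n) + 1)
          (fun k => (t + 1 - n) + k) (fun k => t - (t + 1 - n) - k)
          (by intro k hk h; simp only at h; omega)
      exact_mod_cast congrArg (Nat.cast (R := Int)) hu
    · have hu : d2Cnt (setCell st.g i j v) n (i + j) + (if poB (cell st.g i j) then 1 else 0)
          = d2Cnt st.g n (i + j) + (if poB v then 1 else 0) :=
        line_update n st.g i j v hg hi hj poB
          (min (i + j) (n - 1) - ((i + j) + 1 - n) + 1) (i - ((i + j) + 1 - n))
          (fun k => ((i + j) + 1 - n) + k) (fun k => (i + j) - ((i + j) + 1 - n) - k)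
          (by omega) (by simp only; omega) (by simp only; omega)
          (by intro k hk e1 e2; simp only at e1 e2; omega)
      split_ifs at hu ⊢ <;> push_cast <;> omega

lemma step_agree (n : Nat) (st : BSt) (ij : Nat × Nat)
    (hi : ij.1 < n) (hj : ij.2 < n) (hg : RowsOk n st.g) (hinv : CInv n st) :
    astep (st.g, st.ch) ij = ((bstep n st ij).g, (bstep n st ij).ch)
      ∧ RowsOk n (bstep n st ij).g ∧ CInv n (bstep n st ij) := by
  obtain ⟨i, j⟩ := ij
  simp only at hi hj
  obtain ⟨hrZ, hcZ, h1Z, h2Z⟩ := hinv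
  have hrowD : st.row.getD i 0 = ((rowCnt st.g n i : Int)) := by
    rw [hrZ]; exact PySem.List.getD_map_range _ n i 0 hi
  have hcolD : st.col.getD j 0 = ((colCnt st.g n j : Int)) := by
    rw [hcZ]; exact PySem.List.getD_map_range _ n j 0 hj
  have hd1D : st.d1.getD (i + (n - 1) - j) 0 = ((d1Cnt st.g n (i + (n - 1) - j) : Int)) := by
    rw [h1Z]; exact PySem.List.getD_map_range _ _ _ 0 (by omega)
  have hd2D : st.d2.getD (i + j) 0 = ((d2Cnt st.g n (i + j) : Int)) := by
    rw [h2Z]; exact PySem.List.getD_map_range _ _ _ 0 (by omega)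
  have hP : is_space_plus_only_py st.g i j
      = decide (0 < st.row.getD i 0 + st.col.getD j 0
          - 2 * (if xoB (cell st.g i j) then 1 else 0)) := by
    rw [hrowD, hcolD]; exact plus_bridge st.g n i j hg.1 hi hj
  have hC : is_space_cross_only_py st.g i j
      = decide (0 < st.d1.getD (i + (n - 1) - j) 0 + st.d2.getD (i + j) 0
          - 2 * (if poB (cell st.g i j) then 1 else 0)) := by
    rw [hd1D, hd2D]; exact cross_bridge st.g n i j hg.1 hi hj
  by_cases hPp : (0 < st.row.getD i 0 + st.col.getD j 0
      - 2 * (if xoB (cell st.g i j) then 1 else 0)) <;>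
  by_cases hCp : (0 < st.d1.getD (i + (n - 1) - j) 0 + st.d2.getD (i + j) 0
      - 2 * (if poB (cell st.g i j) then 1 else 0)) <;>
  simp only [astep, bstep, hP, hC, hPp, hCp, decide_true, decide_false,
    Bool.true_and, Bool.false_and, Bool.and_true, Bool.and_false, Bool.not_true,
    Bool.not_false, if_true, if_false, Bool.false_eq_true]
  · -- plus_only ∧ cross_only : A skips through one of its four guards, B skips
    split_ifs <;> exact ⟨by trivial, hg, hrZ, hcZ, h1Z, h2Z⟩
  · -- plus_only only : both write "+" unless the cell already holds it
    by_cases hc : (cell st.g i j == "+") <;> simp only [hc, Bool.false_eq_true, reduceIte]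
    · exact ⟨by trivial, hg, hrZ, hcZ, h1Z, h2Z⟩
    · exact ⟨by trivial, rowsOk_setCell n st.g i j "+" hg hi,
        write_inv n st i j "+" hi hj hg ⟨hrZ, hcZ, h1Z, h2Z⟩⟩
  · -- cross_only only : both write "x" unless the cell already holds it
    by_cases hc : (cell st.g i j == "x") <;> simp only [hc, Bool.false_eq_true, reduceIte]
    · exact ⟨by trivial, hg, hrZ, hcZ, h1Z, h2Z⟩
    · exact ⟨by trivial, rowsOk_setCell n st.g i j "x" hg hi,
        write_inv n st i j "x" hi hj hg ⟨hrZ, hcZ, h1Z, h2Z⟩⟩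
  · -- neither : both write "o" unless the cell already holds it
    by_cases hc : (cell st.g i j == "o") <;> simp only [hc, Bool.false_eq_true, reduceIte]
    · exact ⟨by trivial, hg, hrZ, hcZ, h1Z, h2Z⟩
    · exact ⟨by trivial, rowsOk_setCell n st.g i j "o" hg hi,
        write_inv n st i j "o" hi hj hg ⟨hrZ, hcZ, h1Z, h2Z⟩⟩

lemma loop_agree (n : Nat) (P : List (Nat × Nat)) (st : BSt)
    (hP : ∀ ij ∈ P, ij.1 < n ∧ ij.2 < n) (hg : RowsOk n st.g) (hinv : CInv n st) :
    P.foldl astep (st.g, st.ch) = ((P.foldl (bstep n) st).g, (P.foldl (bstep n) st).ch)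
      ∧ RowsOk n (P.foldl (bstep n) st).g ∧ CInv n (P.foldl (bstep n) st) := by
  induction P generalizing st with
  | nil => exact ⟨rfl, hg, hinv⟩
  | cons ij P ih =>
    have hmem := hP ij List.mem_cons_self
    have h := step_agree n st ij hmem.1 hmem.2 hg hinv
    simp only [List.foldl_cons]
    rw [h.1]
    exact ih (bstep n st ij) (fun x hx => hP x (List.mem_cons_of_mem _ hx)) h.2.1 h.2.2

-- ===== VERDICT (by name: the statement is the Claim_ definition above) =====
theorem handle_case_py_spec : Claim_equal_handle_case_py := by
  intro grid hdom hpre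
  unfold Spec_handle_case_py
  have hpairs : ∀ ij ∈ pairs grid.length, ij.1 < grid.length ∧ ij.2 < grid.length := by
    intro ij hij
    simp only [pairs, List.mem_flatMap, List.mem_map, List.mem_range] at hij
    obtain ⟨a, ha, b, hb, rfl⟩ := hij
    exact ⟨ha, hb⟩
  have h := loop_agree grid.length (pairs grid.length)
    { g := grid
      row := (List.range grid.length).map (fun i => ((rowCnt grid grid.length i : Int)))
      col := (List.range grid.length).map (fun j => ((colCnt grid grid.length j : Int)))
      d1 := (List.range (2 * grid.length - 1)).map (fun t => ((d1Cnt grid grid.length t : Int)))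
      d2 := (List.range (2 * grid.length - 1)).map (fun s => ((d2Cnt grid grid.length s : Int)))
      ch := [] } hpairs ⟨rfl, hpre⟩ ⟨rfl, rfl, rfl, rfl⟩
  obtain ⟨heq, hrows, _⟩ := h
  dsimp only at heq
  simp only [handle_case_py, handle_case_py_alt, score_grid_py]
  rw [heq]
  dsimp only
  rw [hrows.1]
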